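-- pv_equiv track=rewrite | github.com/shiwanimishra05/Shiwani-Mishra_astuto | q1.py | first_stable_character
-- ===== SOURCE A (Python) =====
-- def first_stable_character(s):
--     """
--     Find the first stable character in the string.
--
--     A character is stable if:
--     1. It appears at least twice
--     2. All occurrences are in one continuous group
--
--     Args:
--         s (str): Input string
--
--     Returns:
--         str or None: First stable character, or None if no stable character exists
--
--     Examples:
--         >>> first_stable_character("abccba")
--         'c'
--         >>> first_stable_character("abc")
--         None
--         >>> first_stable_character("a")
--         None
--     """
--     # TODO: Implement your solution here
--     char_count = {}
--     for char in s:
--         char_count[char] = char_count.get(char, 0) + 1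
--
--     char_positions = {}
--     for i, char in enumerate(s):
--         if char not in char_positions:
--             char_positions[char] = [i, i]
--         else:
--             char_positions[char][1] = i
--
--     for i, char in enumerate(s):
--         if char_count[char] >= 2:
--             first_pos, last_pos = char_positions[char]
--
--             if i == first_pos:
--
--                 if last_pos - first_pos + 1 == char_count[char]:
--                     return char
--
--     return None
-- ===== SOURCE B (Python) =====
-- def first_stable_character(s):
--     # Split s into maximal runs of equal characters, count runs per character,
--     # then return the first run that is long enough and unique for its character.
--     runs = []
--     i, n = 0, len(s)
--     while i < n:
--         j = i
--         while j < n and s[j] == s[i]: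
--             j += 1
--         runs.append((s[i], j - i))
--         i = j
--     run_count = {}
--     for c, _ in runs:
--         run_count[c] = run_count.get(c, 0) + 1
--     for c, k in runs:
--         if k >= 2 and run_count.get(c, 0) == 1:
--             return c
--     return None
-- ===== Notes on version B (the rewrite author's own statement) =====
-- stated objective: alternative
-- what changed: A builds per-character count and first/last-position dictionaries and re-scans every index; B decomposes the string into maximal runs once and returns the char of the first run that has length >= 2 and is its character's only run.
import Mathlib
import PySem

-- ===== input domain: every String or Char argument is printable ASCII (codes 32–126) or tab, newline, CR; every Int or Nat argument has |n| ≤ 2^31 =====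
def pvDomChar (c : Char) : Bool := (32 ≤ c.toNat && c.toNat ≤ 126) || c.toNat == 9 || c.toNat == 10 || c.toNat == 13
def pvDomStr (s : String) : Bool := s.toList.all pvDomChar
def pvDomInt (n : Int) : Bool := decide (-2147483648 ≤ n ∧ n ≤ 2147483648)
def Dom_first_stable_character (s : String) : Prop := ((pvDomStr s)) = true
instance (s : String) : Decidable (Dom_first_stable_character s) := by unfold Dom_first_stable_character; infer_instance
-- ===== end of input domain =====

-- B replaces A's per-character count / first-last-position dictionaries and index re-scan by a single
-- decomposition into maximal runs: return the char of the first run of length >= 2 that is its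
-- character's only run (objective: alternative, same O(n) cost).

-- ===== PORT A =====

-- char_count = {}; for char in s: char_count[char] = char_count.get(char, 0) + 1
def pvCountDict (l : List Char) : PySem.Dict Char Int :=
  l.foldl (fun d c => d.insert c (d.getD c 0 + 1)) PySem.Dict.empty

-- body of the second loop: if char not in char_positions: char_positions[char] = [i, i]
--                          else: char_positions[char][1] = i
def pvPosStep (d : PySem.Dict Char (Int × Int)) (p : Int × Char) : PySem.Dict Char (Int × Int) :=
  if d.contains p.2 = false then d.insert p.2 (p.1, p.1)
  else d.modify p.2 (0, 0) (fun q => (q.1, p.1))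

-- char_positions = {}; for i, char in enumerate(s): ...
def pvPosDict (l : List Char) : PySem.Dict Char (Int × Int) :=
  (PySem.List.enumerate l 0).foldl pvPosStep PySem.Dict.empty

-- third loop: for i, char in enumerate(s): if char_count[char] >= 2: ...
def pvScanA (cd : PySem.Dict Char Int) (pd : PySem.Dict Char (Int × Int)) :
    List (Int × Char) → Option String
  | [] => none
  | (i, c) :: t =>
    match cd.get? c with
    | none => none   -- Python: KeyError; unreachable, every scanned char is a key of char_count
    | some cnt =>
      if 2 ≤ cnt then
        match pd.get? c with
        | none => none   -- Python: KeyError; unreachable likewise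
        | some fl =>
          if i = fl.1 then
            if fl.2 - fl.1 + 1 = cnt then some (String.mk [c])
            else pvScanA cd pd t
          else pvScanA cd pd t
      else pvScanA cd pd t

def first_stable_character (s : String) : Option String :=
  pvScanA (pvCountDict s.toList) (pvPosDict s.toList) (PySem.List.enumerate s.toList 0)

-- ===== PORT B =====

-- while i < n: j = i; while j < n and s[j] == s[i]: j += 1; runs.append((s[i], j - i)); i = j
-- (the inner while counts the chars equal to s[i] after position i: takeWhile)
def pvRuns : List Char → List (Char × Int)
  | [] => []
  | c :: rest =>
    (c, ((rest.takeWhile (· == c)).length : Int) + 1) :: pvRuns (rest.dropWhile (· == c))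
  termination_by l => l.length
  decreasing_by exact Nat.lt_succ_of_le (rest.length_dropWhile_le (· == c))

-- run_count = {}; for c, _ in runs: run_count[c] = run_count.get(c, 0) + 1
def pvRunCount (rs : List (Char × Int)) : PySem.Dict Char Int :=
  rs.foldl (fun d p => d.insert p.1 (d.getD p.1 0 + 1)) PySem.Dict.empty

-- for c, k in runs: if k >= 2 and run_count.get(c, 0) == 1: return c
def pvScanB (rc : PySem.Dict Char Int) : List (Char × Int) → Option String
  | [] => none
  | (c, k) :: t =>
    if 2 ≤ k ∧ rc.getD c 0 = 1 then some (String.mk [c]) else pvScanB rc t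

def first_stable_character_alt (s : String) : Option String :=
  let rs := pvRuns s.toList
  pvScanB (pvRunCount rs) rs

-- ===== PRECONDITION & SPEC =====
def Spec_first_stable_character (s : String) (out : Option String) : Prop := out = first_stable_character_alt s
instance (s : String) (out : Option String) : Decidable (Spec_first_stable_character s out) := by unfold Spec_first_stable_character; infer_instance

-- ===== CLAIM (what is proved, stated in full; the proofs are below) =====
def Claim_equal_first_stable_character : Prop := ∀ (s : String), Dom_first_stable_character s → Spec_first_stable_character s (first_stable_character s)

-- ===== LEMMAS AND PROOFS =====

-- index of the first occurrence of c (meaningful when c ∈ l)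
def pvFst (c : Char) : List Char → Nat
  | [] => 0
  | a :: t => if a = c then 0 else pvFst c t + 1

-- index of the last occurrence of c (meaningful when c ∈ l)
def pvLst (c : Char) : List Char → Nat
  | [] => 0
  | a :: t => if c ∈ t then pvLst c t + 1 else 0

-- the per-character test A performs at the first occurrence of c
def pvOk (l : List Char) (c : Char) : Bool :=
  decide (2 ≤ (l.count c : Int)) &&
  decide ((pvLst c l : Int) - (pvFst c l : Int) + 1 = (l.count c : Int))

def pvRunChars (l : List Char) : List Char := (pvRuns l).map Prod.fst

def pvRunCnt (l : List Char) (c : Char) : Nat := (pvRunChars l).count c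

-- find? only depends on the predicate's values on the members
lemma pvFind?_congr {α : Type} (p q : α → Bool) (xs : List α)
    (h : ∀ x ∈ xs, p x = q x) : xs.find? p = xs.find? q := by
  induction xs with
  | nil => rfl
  | cons a t ih =>
    have ha := h a (List.mem_cons_self ..)
    by_cases hp : p a = true
    · rw [List.find?_cons_of_pos hp, List.find?_cons_of_pos (ha ▸ hp)]
    · rw [List.find?_cons_of_neg hp, List.find?_cons_of_neg (by rw [← ha]; exact hp),
        ih (fun x hx => h x (List.mem_cons_of_mem a hx))]

-- ---- small facts about pvFst / pvLst ----

lemma pvFst_append (c : Char) (u v : List Char) :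
    pvFst c (u ++ v) = if c ∈ u then pvFst c u else u.length + pvFst c v := by
  induction u with
  | nil => simp [pvFst]
  | cons a u ih =>
    by_cases hac : a = c
    · subst hac
      simp [pvFst]
    · have hca : ¬ (c = a) := fun h' => hac h'.symm
      by_cases hcu : c ∈ u <;>
        simp [pvFst, hac, hca, hcu, ih] <;> omega

lemma pvFst_lt (c : Char) (u : List Char) (h : c ∈ u) : pvFst c u < u.length := by
  induction u with
  | nil => simp at h
  | cons a u ih =>
    by_cases hac : a = c
    · simp [pvFst, hac]
    · have hcu : c ∈ u := by
        rcases List.mem_cons.mp h with h' | h'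
        · exact absurd h'.symm hac
        · exact h'
      simp only [pvFst, if_neg hac, List.length_cons]
      exact Nat.succ_lt_succ (ih hcu)

lemma pvLst_not_mem (c : Char) (v : List Char) (h : c ∉ v) : pvLst c v = 0 := by
  induction v with
  | nil => rfl
  | cons a t ih =>
    have hct : c ∉ t := fun h' => h (List.mem_cons_of_mem a h')
    simp [pvLst, hct]

lemma pvLst_append (c : Char) (u v : List Char) :
    pvLst c (u ++ v) = if c ∈ v then u.length + pvLst c v else pvLst c u := by
  induction u with
  | nil =>
    by_cases h : c ∈ v
    · simp [pvLst, h]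
    · simp [pvLst, h, pvLst_not_mem c v h]
  | cons a u ih =>
    by_cases hcv : c ∈ v <;> by_cases hcu : c ∈ u <;>
      simp [pvLst, hcv, hcu, ih] <;> omega

lemma pvLst_replicate (c : Char) (n : Nat) :
    pvLst c (List.replicate (n + 1) c) = n := by
  induction n with
  | zero => simp [pvLst]
  | succ m ih =>
    rw [List.replicate_succ, pvLst, if_pos (by simp [List.mem_replicate]), ih]

-- the occurrences of c fit between its first and last position
lemma pvSpan_count (l : List Char) (c : Char) (h : c ∈ l) :
    pvFst c l + l.count c ≤ pvLst c l + 1 := by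
  induction l with
  | nil => simp at h
  | cons a t ih =>
    by_cases hct : c ∈ t
    · have hle := ih hct
      by_cases hac : a = c <;>
        simp [pvFst, pvLst, List.count_cons, hac, hct] <;> omega
    · have hac : a = c := by
        rcases List.mem_cons.mp h with h' | h'
        · exact h'.symm
        · exact absurd h' hct
      have hz : t.count c = 0 := List.count_eq_zero.mpr hct
      simp [pvFst, pvLst, List.count_cons, hac, hct, hz]

-- ---- dictionary specs ----

lemma pvGet?_eq_some_getD {ν : Type} (d : PySem.Dict Char ν) (k : Char) (dflt : ν)
    (h : d.contains k = true) : d.get? k = some (d.getD k dflt) := by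
  rw [PySem.Dict.contains_eq_isSome_get?] at h
  cases hg : d.get? k with
  | none => rw [hg] at h; simp at h
  | some v => rw [PySem.Dict.getD_eq_get?_getD, hg]; rfl

lemma pvCountDict_get? (l : List Char) (c : Char) (h : c ∈ l) :
    (pvCountDict l).get? c = some ((l.count c : Int)) := by
  have he : pvCountDict l = PySem.Dict.counter l :=
    PySem.Dict.foldl_insert_getD_add_one_eq_counter l
  rw [he, pvGet?_eq_some_getD _ _ 0 (by rw [PySem.Dict.contains_counter]; simpa),
    PySem.Dict.getD_counter]

-- invariant of A's position loop: contains = membership, getD = (first, last)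
def pvPosInv (a : List Char) (d : PySem.Dict Char (Int × Int)) : Prop :=
  ∀ c : Char, d.contains c = decide (c ∈ a) ∧
    (c ∈ a → d.getD c (0, 0) = ((pvFst c a : Int), (pvLst c a : Int)))

lemma pvPosStep_inv (a : List Char) (x : Char) (d : PySem.Dict Char (Int × Int))
    (h : pvPosInv a d) : pvPosInv (a ++ [x]) (pvPosStep d ((a.length : Int), x)) := by
  intro c
  have hx := h x
  have hc := h c
  unfold pvPosStep
  by_cases hmem : x ∈ a
  · have hcx : d.contains x = true := by rw [hx.1]; simpa
    rw [hcx, if_neg (by simp)]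
    constructor
    · rw [PySem.Dict.contains_modify, hc.1]
      by_cases hcx' : c = x <;> simp [hcx', hmem]
    · intro hca
      rw [PySem.Dict.getD_modify]
      by_cases hcx' : c = x
      · subst hcx'
        rw [if_pos rfl, hx.2 hmem]
        have h1 : pvFst c (a ++ [c]) = pvFst c a := by
          rw [pvFst_append, if_pos hmem]
        have h2 : pvLst c (a ++ [c]) = a.length := by
          rw [pvLst_append, if_pos (List.mem_singleton.mpr rfl)]
          simp [pvLst]
        rw [h1, h2]
      · rw [if_neg hcx']
        have hca' : c ∈ a := by
          rcases List.mem_append.mp hca with h' | h'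
          · exact h'
          · exact absurd (List.mem_singleton.mp h') hcx'
        rw [hc.2 hca']
        have h1 : pvFst c (a ++ [x]) = pvFst c a := by
          rw [pvFst_append, if_pos hca']
        have h2 : pvLst c (a ++ [x]) = pvLst c a := by
          rw [pvLst_append, if_neg (by simp [hcx'])]
        rw [h1, h2]
  · have hcx : d.contains x = false := by rw [hx.1]; simpa
    rw [hcx, if_pos rfl]
    constructor
    · rw [PySem.Dict.contains_insert, hc.1]
      by_cases hcx' : c = x <;> simp [hcx']
    · intro hca
      rw [PySem.Dict.getD_insert]
      by_cases hcx' : c = x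
      · subst hcx'
        rw [if_pos rfl]
        have h1 : pvFst c (a ++ [c]) = a.length := by
          rw [pvFst_append, if_neg hmem]; simp [pvFst]
        have h2 : pvLst c (a ++ [c]) = a.length := by
          rw [pvLst_append, if_pos (List.mem_singleton.mpr rfl)]
          simp [pvLst]
        rw [h1, h2]
      · rw [if_neg hcx']
        have hca' : c ∈ a := by
          rcases List.mem_append.mp hca with h' | h'
          · exact h'
          · exact absurd (List.mem_singleton.mp h') hcx'
        rw [hc.2 hca']
        have h1 : pvFst c (a ++ [x]) = pvFst c a := by
          rw [pvFst_append, if_pos hca']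
        have h2 : pvLst c (a ++ [x]) = pvLst c a := by
          rw [pvLst_append, if_neg (by simp [hcx'])]
        rw [h1, h2]

lemma pvPosFold_inv (b : List Char) : ∀ (a : List Char) (d : PySem.Dict Char (Int × Int)),
    pvPosInv a d →
    pvPosInv (a ++ b) ((PySem.List.enumerate b (a.length : Int)).foldl pvPosStep d) := by
  induction b with
  | nil => intro a d h; simpa [PySem.List.enumerate_nil] using h
  | cons x b ih =>
    intro a d h
    rw [PySem.List.enumerate_cons, List.foldl_cons]
    have h' := pvPosStep_inv a x d h
    have hlen : ((a.length : Int) + 1) = (((a ++ [x]).length : Nat) : Int) := by simp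
    rw [hlen]
    have hres := ih (a ++ [x]) _ h'
    rw [show (a ++ [x]) ++ b = a ++ x :: b by simp] at hres
    exact hres

lemma pvPosDict_get? (l : List Char) (c : Char) (h : c ∈ l) :
    (pvPosDict l).get? c = some ((pvFst c l : Int), (pvLst c l : Int)) := by
  have h0 : pvPosInv [] PySem.Dict.empty := by
    intro c
    constructor
    · simp [PySem.Dict.contains_empty]
    · intro hc; simp at hc
  have hinv := pvPosFold_inv l [] PySem.Dict.empty h0
  rw [show ((([] : List Char).length : Nat) : Int) = (0 : Int) by simp] at hinv
  rw [List.nil_append] at hinv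
  have hcon : (pvPosDict l).contains c = true := by
    have := (hinv c).1
    unfold pvPosDict
    rw [this]; simpa
  rw [pvGet?_eq_some_getD _ _ (0, 0) hcon]
  have hgd := (hinv c).2 h
  unfold pvPosDict
  rw [hgd]

-- ---- A reduces to find? pvOk over the characters ----

lemma pvScanA_eq (l b : List Char) : ∀ (a : List Char), a ++ b = l →
    pvScanA (pvCountDict l) (pvPosDict l) (PySem.List.enumerate b (a.length : Int)) =
      (b.find? (fun c => pvOk l c && !(decide (c ∈ a)))).map (fun c => String.mk [c]) := by
  induction b with
  | nil => intro a _; simp [pvScanA, PySem.List.enumerate_nil]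
  | cons c t ih =>
    intro a h
    have hc : c ∈ l := by rw [← h]; exact List.mem_append_right a (List.mem_cons_self ..)
    rw [PySem.List.enumerate_cons]
    simp only [pvScanA, pvCountDict_get? l c hc, pvPosDict_get? l c hc]
    have hfst : pvFst c l = if c ∈ a then pvFst c a else a.length := by
      rw [← h, pvFst_append]
      by_cases hm : c ∈ a <;> simp [hm, pvFst]
    have hguard : ((a.length : Int) = ((pvFst c l : Nat) : Int)) ↔ c ∉ a := by
      constructor
      · intro hg hm
        rw [hfst, if_pos hm] at hg
        have := pvFst_lt c a hm
        omega
      · intro hm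
        rw [hfst, if_neg hm]
    have htail :
        pvScanA (pvCountDict l) (pvPosDict l) (PySem.List.enumerate t ((a.length : Int) + 1)) =
          (t.find? (fun d => pvOk l d && !(decide (d ∈ a ++ [c])))).map (fun c => String.mk [c]) := by
      have hlen : ((a.length : Int) + 1) = (((a ++ [c]).length : Nat) : Int) := by simp
      rw [hlen]
      exact ih (a ++ [c]) (by simpa using h)
    by_cases hm : c ∈ a
    · have hg : ¬ ((a.length : Int) = ((pvFst c l : Nat) : Int)) := fun hg => (hguard.mp hg) hm
      rw [List.find?_cons_of_neg (by simp [hm])]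
      have hpeq : (fun d => pvOk l d && !(decide (d ∈ a ++ [c]))) =
          (fun d => pvOk l d && !(decide (d ∈ a))) := by
        funext d
        by_cases hdc : d = c
        · subst hdc; simp [hm]
        · simp [hdc]
      by_cases h2 : 2 ≤ ((l.count c : Nat) : Int)
      · rw [if_pos h2, if_neg hg, htail, hpeq]
      · rw [if_neg h2, htail, hpeq]
    · have hg : ((a.length : Int) = ((pvFst c l : Nat) : Int)) := hguard.mpr hm
      by_cases h2 : 2 ≤ ((l.count c : Nat) : Int)
      · rw [if_pos h2, if_pos hg]
        by_cases hsp : ((pvLst c l : Nat) : Int) - ((pvFst c l : Nat) : Int) + 1 = ((l.count c : Nat) : Int)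
        · rw [if_pos hsp]
          rw [List.find?_cons_of_pos (by simp [pvOk, hm, h2, hsp])]
          simp
        · rw [if_neg hsp]
          have hpeq : (fun d => pvOk l d && !(decide (d ∈ a ++ [c]))) =
              (fun d => pvOk l d && !(decide (d ∈ a))) := by
            funext d
            by_cases hdc : d = c
            · subst hdc; simp [pvOk, hsp]
            · simp [hdc]
          rw [List.find?_cons_of_neg (by simp [pvOk, hsp]), htail, hpeq]
      · rw [if_neg h2]
        have hpeq : (fun d => pvOk l d && !(decide (d ∈ a ++ [c]))) =
            (fun d => pvOk l d && !(decide (d ∈ a))) := by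
          funext d
          by_cases hdc : d = c
          · subst hdc; simp [pvOk, h2]
          · simp [hdc]
        rw [List.find?_cons_of_neg (by simp [pvOk, h2]), htail, hpeq]

lemma pvA_char (s : String) :
    first_stable_character s =
      (s.toList.find? (pvOk s.toList)).map (fun c => String.mk [c]) := by
  unfold first_stable_character
  rw [show (0 : Int) = ((([] : List Char).length : Nat) : Int) by simp,
    pvScanA_eq s.toList s.toList [] rfl]
  congr 1
  apply pvFind?_congr
  intro x _
  simp

-- ---- run decomposition facts ----

lemma pvTakeWhile_replicate (c : Char) (rest : List Char) :
    rest.takeWhile (· == c) = List.replicate (rest.takeWhile (· == c)).length c := by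
  apply List.eq_replicate_of_mem
  intro b hb
  simpa using List.mem_takeWhile_imp hb

lemma pvDecomp (c : Char) (rest : List Char) :
    c :: rest =
      List.replicate ((rest.takeWhile (· == c)).length + 1) c ++ rest.dropWhile (· == c) := by
  rw [List.replicate_succ, List.cons_append, ← pvTakeWhile_replicate,
    List.takeWhile_append_dropWhile]

lemma pvDropWhile_head (p : Char → Bool) (l : List Char) (x : Char) (t' : List Char)
    (h : l.dropWhile p = x :: t') : p x = false := by
  induction l with
  | nil => simp [List.dropWhile] at h
  | cons a l ih =>
    rw [List.dropWhile_cons] at h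
    by_cases hp : p a = true
    · rw [if_pos hp] at h; exact ih h
    · rw [if_neg hp] at h
      cases h
      simpa using hp

lemma pvFst_dropWhile_pos (c : Char) (rest : List Char)
    (h : c ∈ rest.dropWhile (· == c)) : 1 ≤ pvFst c (rest.dropWhile (· == c)) := by
  cases hd : rest.dropWhile (· == c) with
  | nil => rw [hd] at h; simp at h
  | cons x t' =>
    have hx : (x == c) = false := pvDropWhile_head _ rest x t' hd
    have hxc : ¬ (x = c) := by simpa using hx
    simp [pvFst, hxc]

lemma pvRunChars_cons (c : Char) (rest : List Char) :
    pvRunChars (c :: rest) = c :: pvRunChars (rest.dropWhile (· == c)) := by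
  simp [pvRunChars, pvRuns]

lemma pvMemRunChars (l : List Char) : ∀ c : Char, c ∈ pvRunChars l ↔ c ∈ l := by
  induction l using pvRuns.induct with
  | case1 => intro c; simp [pvRunChars, pvRuns]
  | case2 c₀ rest ih =>
    intro c
    rw [pvRunChars_cons, List.mem_cons, List.mem_cons, ih c]
    constructor
    · rintro (h | h)
      · exact Or.inl h
      · refine Or.inr ?_
        have := List.takeWhile_append_dropWhile (p := (· == c₀)) (l := rest)
        rw [← this]
        exact List.mem_append_right _ h
    · rintro (h | h)
      · exact Or.inl h
      · have := List.takeWhile_append_dropWhile (p := (· == c₀)) (l := rest)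
        rw [← this] at h
        rcases List.mem_append.mp h with h' | h'
        · exact Or.inl (by simpa using List.mem_takeWhile_imp h')
        · exact Or.inr h'

lemma pvRunCnt_cons (c₀ : Char) (rest : List Char) (c : Char) :
    pvRunCnt (c₀ :: rest) c =
      (if c = c₀ then 1 else 0) + pvRunCnt (rest.dropWhile (· == c₀)) c := by
  unfold pvRunCnt
  rw [pvRunChars_cons]
  by_cases h : c = c₀
  · subst h
    rw [List.count_cons_self, if_pos rfl]
    omega
  · rw [List.count_cons_of_ne (Ne.symm h), if_neg h]
    omega

-- a character with a single run: the run carries all its occurrences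
lemma pvR1 (l : List Char) : ∀ (pc : Char) (pk : Int), (pc, pk) ∈ pvRuns l →
    pvRunCnt l pc = 1 → (l.count pc : Int) = pk := by
  induction l using pvRuns.induct with
  | case1 => intro pc pk hp _; simp [pvRuns] at hp
  | case2 c₀ rest ih =>
    intro pc pk hp h1
    have heq : pvRuns (c₀ :: rest) =
        (c₀, ((rest.takeWhile (· == c₀)).length : Int) + 1) ::
          pvRuns (rest.dropWhile (· == c₀)) := by
      simp [pvRuns]
    rw [heq] at hp
    rw [pvRunCnt_cons] at h1
    rcases List.mem_cons.mp hp with hph | hpt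
    · rw [Prod.mk.injEq] at hph
      obtain ⟨e1, e2⟩ := hph
      subst e1
      subst e2
      rw [if_pos rfl] at h1
      have hnm : pc ∉ rest.dropWhile (· == pc) := by
        intro hm
        have hpos : 0 < pvRunCnt (rest.dropWhile (· == pc)) pc :=
          List.count_pos_iff.mpr ((pvMemRunChars _ pc).mpr hm)
        omega
      rw [pvDecomp pc rest, List.count_append, List.count_replicate,
        List.count_eq_zero.mpr hnm]
      simp
    · by_cases hpc : pc = c₀
      · exfalso
        have hmem : pc ∈ pvRunChars (rest.dropWhile (· == c₀)) :=
          List.mem_map_of_mem hpt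
        have hpos : 0 < pvRunCnt (rest.dropWhile (· == c₀)) pc :=
          List.count_pos_iff.mpr hmem
        rw [if_pos hpc] at h1
        omega
      · rw [if_neg hpc] at h1
        have hcnt : (c₀ :: rest).count pc = (rest.dropWhile (· == c₀)).count pc := by
          rw [pvDecomp c₀ rest, List.count_append, List.count_replicate]
          simp [Ne.symm hpc]
        rw [hcnt]
        exact ih pc pk hpt (by omega)

-- the span condition of A holds exactly when the character has a single run
lemma pvR2 (l : List Char) : ∀ c : Char, c ∈ l →
    (((pvLst c l : Int) - (pvFst c l : Int) + 1 = (l.count c : Int)) ↔ pvRunCnt l c = 1) := by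
  induction l using pvRuns.induct with
  | case1 => intro c hc; simp at hc
  | case2 c₀ rest ih =>
    intro c hc
    have hdec := pvDecomp c₀ rest
    rw [pvRunCnt_cons]
    by_cases hcc : c = c₀
    · subst hcc
      have hf : pvFst c (c :: rest) = 0 := by simp [pvFst]
      have hcnt : (c :: rest).count c =
          ((rest.takeWhile (· == c)).length + 1) + (rest.dropWhile (· == c)).count c := by
        rw [hdec, List.count_append, List.count_replicate]
        simp
      by_cases hct : c ∈ rest.dropWhile (· == c)
      · have hl : pvLst c (c :: rest) =
            ((rest.takeWhile (· == c)).length + 1) + pvLst c (rest.dropWhile (· == c)) := by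
          rw [hdec, pvLst_append, if_pos hct, List.length_replicate]
        have hsc := pvSpan_count _ c hct
        have hfp := pvFst_dropWhile_pos c rest hct
        have hrc : 0 < pvRunCnt (rest.dropWhile (· == c)) c :=
          List.count_pos_iff.mpr ((pvMemRunChars _ c).mpr hct)
        rw [hf, hl, hcnt, if_pos rfl]
        push_cast
        constructor
        · intro h'; omega
        · intro h'; omega
      · have hl : pvLst c (c :: rest) = (rest.takeWhile (· == c)).length := by
          rw [hdec, pvLst_append, if_neg hct, pvLst_replicate]
        have hz : (rest.dropWhile (· == c)).count c = 0 := List.count_eq_zero.mpr hct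
        have hrz : pvRunCnt (rest.dropWhile (· == c)) c = 0 := by
          unfold pvRunCnt
          exact List.count_eq_zero.mpr (fun hm => hct ((pvMemRunChars _ c).mp hm))
        rw [hf, hl, hcnt, hz, hrz, if_pos rfl]
        push_cast
        constructor <;> intro _ <;> first | trivial | omega
    · have hct : c ∈ rest.dropWhile (· == c₀) := by
        rcases List.mem_cons.mp hc with h' | h'
        · exact absurd h' hcc
        · rw [← List.takeWhile_append_dropWhile (p := (· == c₀)) (l := rest)] at h'
          rcases List.mem_append.mp h' with h'' | h''
          · exact absurd (by simpa using List.mem_takeWhile_imp h'') hcc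
          · exact h''
      have hf : pvFst c (c₀ :: rest) =
          ((rest.takeWhile (· == c₀)).length + 1) + pvFst c (rest.dropWhile (· == c₀)) := by
        rw [hdec, pvFst_append, if_neg (by simp [List.mem_replicate, hcc]), List.length_replicate]
      have hl : pvLst c (c₀ :: rest) =
          ((rest.takeWhile (· == c₀)).length + 1) + pvLst c (rest.dropWhile (· == c₀)) := by
        rw [hdec, pvLst_append, if_pos hct, List.length_replicate]
      have hcnt : (c₀ :: rest).count c = (rest.dropWhile (· == c₀)).count c := by
        rw [hdec, List.count_append, List.count_replicate]
        simp [Ne.symm hcc]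
      have hiff := ih c hct
      rw [hf, hl, hcnt, if_neg hcc]
      push_cast
      push_cast at hiff
      constructor
      · intro h'
        have : (pvLst c (rest.dropWhile (· == c₀)) : Int) -
            (pvFst c (rest.dropWhile (· == c₀)) : Int) + 1 =
            ((rest.dropWhile (· == c₀)).count c : Int) := by omega
        have := hiff.mp this
        omega
      · intro h'
        have := hiff.mpr (by omega)
        omega

-- ---- B reduces to find? pvOk over the characters ----

lemma pvRc_getD (rs : List (Char × Int)) (c : Char) :
    (pvRunCount rs).getD c 0 = ((rs.map Prod.fst).count c : Int) := by
  unfold pvRunCount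
  have h1 : (rs.map Prod.fst).foldl
      (fun (d : PySem.Dict Char Int) x => d.insert x (d.getD x 0 + 1)) PySem.Dict.empty =
      rs.foldl (fun d p => d.insert p.1 (d.getD p.1 0 + 1)) PySem.Dict.empty := by
    rw [List.foldl_map]
  rw [← h1, PySem.Dict.getD_foldl_insert_add_one]
  simp [PySem.Dict.getD_empty]

lemma pvScanB_eq (rc : PySem.Dict Char Int) (rs : List (Char × Int)) :
    pvScanB rc rs =
      (rs.find? (fun p => decide (2 ≤ p.2 ∧ rc.getD p.1 0 = 1))).map
        (fun p => String.mk [p.1]) := by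
  induction rs with
  | nil => simp [pvScanB]
  | cons p t ih =>
    obtain ⟨c, k⟩ := p
    simp only [pvScanB]
    by_cases h : 2 ≤ k ∧ rc.getD c 0 = 1
    · rw [if_pos h, List.find?_cons_of_pos (by simpa using h)]
      rfl
    · rw [if_neg h, List.find?_cons_of_neg (by simpa using h), ih]

lemma pvPred (l : List Char) (p : Char × Int) (hp : p ∈ pvRuns l) :
    (decide (2 ≤ p.2 ∧ (pvRunCount (pvRuns l)).getD p.1 0 = 1)) = pvOk l p.1 := by
  have hm : p.1 ∈ l := (pvMemRunChars l p.1).mp (List.mem_map_of_mem hp)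
  rw [pvRc_getD]
  unfold pvOk
  rw [Bool.eq_iff_iff]
  simp only [Bool.and_eq_true, decide_eq_true_eq]
  have hcast : (((pvRuns l).map Prod.fst).count p.1 : Int) = 1 ↔ pvRunCnt l p.1 = 1 := by
    unfold pvRunCnt pvRunChars
    constructor <;> intro h' <;> omega
  constructor
  · rintro ⟨h2, h1⟩
    have hr1 : pvRunCnt l p.1 = 1 := hcast.mp h1
    have hcnt := pvR1 l p.1 p.2 (by simpa using hp) hr1
    exact ⟨by omega, (pvR2 l p.1 hm).mpr hr1⟩
  · rintro ⟨h2, hsp⟩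
    have hr1 : pvRunCnt l p.1 = 1 := (pvR2 l p.1 hm).mp hsp
    have hcnt := pvR1 l p.1 p.2 (by simpa using hp) hr1
    exact ⟨by omega, hcast.mpr hr1⟩

lemma pvRunFind (l : List Char) (r : Char → Bool) :
    (pvRunChars l).find? r = l.find? r := by
  induction l using pvRuns.induct with
  | case1 => simp [pvRunChars, pvRuns]
  | case2 c₀ rest ih =>
    rw [pvRunChars_cons]
    by_cases hr : r c₀ = true
    · rw [List.find?_cons_of_pos hr, List.find?_cons_of_pos hr]
    · rw [List.find?_cons_of_neg hr, List.find?_cons_of_neg hr, ih]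
      conv_rhs => rw [← List.takeWhile_append_dropWhile (p := (· == c₀)) (l := rest)]
      rw [List.find?_append]
      have hnone : (rest.takeWhile (· == c₀)).find? r = none := by
        rw [List.find?_eq_none]
        intro x hx
        have : x = c₀ := by simpa using List.mem_takeWhile_imp hx
        rw [this]
        exact hr
      rw [hnone, Option.none_or]

lemma pvB_char (s : String) :
    first_stable_character_alt s =
      (s.toList.find? (pvOk s.toList)).map (fun c => String.mk [c]) := by
  unfold first_stable_character_alt
  rw [pvScanB_eq, pvFind?_congr _ _ _ (fun p hp => pvPred s.toList p hp),
    ← pvRunFind s.toList (pvOk s.toList)]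
  unfold pvRunChars
  rw [List.find?_map]
  rw [Option.map_map]
  rfl

-- ===== VERDICT (by name: the statement is the Claim_ definition above) =====
theorem first_stable_character_spec : Claim_equal_first_stable_character := by
  intro s _
  unfold Spec_first_stable_character
  rw [pvA_char, pvB_char]
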